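-- pv_equiv track=rewrite | github.com/mymyeung2/undergrad | comp4462-data_visualization/Accelerate/Accelerate_codes/Static Designs/textana.py | getCommon
-- ===== SOURCE A (Python) =====
-- MAX_COMMON = 2
--
-- def getCommon(set1, set2, set3, set4, set5):
--     commonSet = set()
--     for item in set1.union(set2, set3, set4, set5):
--         count = 0
--         if item in set1:
--             count += 1
--         if item in set2:
--             count += 1
--         if item in set3:
--             count += 1
--         if item in set4:
--             count += 1
--         if item in set5:
--             count += 1
--         if count > MAX_COMMON:
--             commonSet.add(item)
--     return commonSet
-- ===== SOURCE B (Python) =====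
-- def getCommon(set1, set2, set3, set4, set5):
--     counts = {}
--     for s in (set1, set2, set3, set4, set5):
--         for item in s:
--             counts[item] = counts.get(item, 0) + 1
--     return {item for item, c in counts.items() if c > 2}
-- ===== Notes on version B (the rewrite author's own statement) =====
-- stated objective: idiomatic
-- what changed: Replaces A's scan over the five-way union with five membership tests per item by a single pass that builds a frequency dict over all elements and then filters its items with count > 2.
import Mathlib
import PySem

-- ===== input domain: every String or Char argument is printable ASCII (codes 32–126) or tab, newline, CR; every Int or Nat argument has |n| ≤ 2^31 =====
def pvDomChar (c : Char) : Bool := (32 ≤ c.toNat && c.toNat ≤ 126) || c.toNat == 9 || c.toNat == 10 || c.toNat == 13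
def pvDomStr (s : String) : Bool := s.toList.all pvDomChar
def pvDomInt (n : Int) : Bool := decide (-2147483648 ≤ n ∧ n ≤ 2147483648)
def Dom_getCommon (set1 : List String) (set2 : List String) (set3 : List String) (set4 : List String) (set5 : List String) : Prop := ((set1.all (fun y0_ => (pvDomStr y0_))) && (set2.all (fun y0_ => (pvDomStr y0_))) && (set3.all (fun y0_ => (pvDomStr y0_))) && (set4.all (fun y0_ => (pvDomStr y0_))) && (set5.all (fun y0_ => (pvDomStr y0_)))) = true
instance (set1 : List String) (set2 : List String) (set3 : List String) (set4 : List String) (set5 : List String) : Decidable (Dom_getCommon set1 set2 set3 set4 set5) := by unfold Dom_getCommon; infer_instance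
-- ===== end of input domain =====

-- B builds one frequency dict over all five sets' elements and filters items with count > 2,
-- replacing A's scan over the union with five membership tests per item (objective: idiomatic).


-- ===== PORT A =====
def MAX_COMMON : Int := 2

-- count = 0; if item in set1: count += 1; … (the five successive membership tests of A's loop body)
def pvCountA (set1 : List String) (set2 : List String) (set3 : List String) (set4 : List String) (set5 : List String) (item : String) : Int :=
  (if PySem.Set.contains set1 item then 1 else 0)
  + (if PySem.Set.contains set2 item then 1 else 0)
  + (if PySem.Set.contains set3 item then 1 else 0)
  + (if PySem.Set.contains set4 item then 1 else 0)
  + (if PySem.Set.contains set5 item then 1 else 0)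

def getCommon (set1 : List String) (set2 : List String) (set3 : List String) (set4 : List String) (set5 : List String) : List String :=
  -- set1.union(set2, set3, set4, set5): set1's elements then each new element of the others in order
  (PySem.Set.update (PySem.Set.ofList set1) (set2 ++ set3 ++ set4 ++ set5)).foldl
    (fun commonSet item =>
      if pvCountA set1 set2 set3 set4 set5 item > MAX_COMMON then PySem.Set.add commonSet item
      else commonSet)
    PySem.Set.empty

-- ===== PORT B =====
def getCommon_alt (set1 : List String) (set2 : List String) (set3 : List String) (set4 : List String) (set5 : List String) : List String :=
  let counts : PySem.Dict String Int := [set1, set2, set3, set4, set5].foldl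
    (fun d s => s.foldl (fun d item => d.insert item (d.getD item 0 + 1)) d)
    PySem.Dict.empty
  PySem.Set.ofList ((counts.items.filter (fun p => p.2 > 2)).map Prod.fst)

-- ===== PRECONDITION & SPEC =====
-- Pre_ only formalizes the set representation: each 'set[str]' argument is the list of its
-- DISTINCT elements (Python sets never contain duplicates), so it excludes no Python input.
def Pre_getCommon (set1 : List String) (set2 : List String) (set3 : List String) (set4 : List String) (set5 : List String) : Prop :=
  set1.Nodup ∧ set2.Nodup ∧ set3.Nodup ∧ set4.Nodup ∧ set5.Nodup
instance (set1 : List String) (set2 : List String) (set3 : List String) (set4 : List String) (set5 : List String) : Decidable (Pre_getCommon set1 set2 set3 set4 set5) := by unfold Pre_getCommon; infer_instance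

def pvWitness_getCommon : List String × List String × List String × List String × List String :=
  (["a", "b"], ["a"], ["a", "c"], ["c"], ["b"])

def Spec_getCommon (set1 : List String) (set2 : List String) (set3 : List String) (set4 : List String) (set5 : List String) (out : List String) : Prop := out = getCommon_alt set1 set2 set3 set4 set5
instance (set1 : List String) (set2 : List String) (set3 : List String) (set4 : List String) (set5 : List String) (out : List String) : Decidable (Spec_getCommon set1 set2 set3 set4 set5 out) := by unfold Spec_getCommon; infer_instance

-- ===== CLAIM (what is proved, stated in full; the proofs are below) =====
def Claim_equal_getCommon : Prop := ∀ (set1 : List String) (set2 : List String) (set3 : List String) (set4 : List String) (set5 : List String), Dom_getCommon set1 set2 set3 set4 set5 → Pre_getCommon set1 set2 set3 set4 set5 → Spec_getCommon set1 set2 set3 set4 set5 (getCommon set1 set2 set3 set4 set5)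

-- ===== LEMMAS AND PROOFS =====

-- A's loop over a duplicate-free list is a filter: each added item is fresh, so Set.add appends.
lemma foldl_addIf (p : String → Prop) [DecidablePred p] :
    ∀ (l acc : List String), l.Nodup → (∀ x ∈ l, x ∉ acc) →
      l.foldl (fun s x => if p x then PySem.Set.add s x else s) acc
        = acc ++ l.filter (fun x => decide (p x)) := by
  intro l
  induction l with
  | nil => simp
  | cons x xs ih =>
    intro acc hnd hacc
    have hxxs : x ∉ xs := (List.nodup_cons.mp hnd).1
    have hxacc : x ∉ acc := hacc x (by simp)
    by_cases hp : p x
    · simp only [List.foldl_cons, if_pos hp]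
      rw [PySem.Set.add_of_not_mem hxacc,
        ih (acc ++ [x]) (List.nodup_cons.mp hnd).2
          (by intro y hy; simp only [List.mem_append, List.mem_singleton]
              rintro (h | rfl)
              · exact hacc y (by simp [hy]) h
              · exact hxxs hy)]
      simp [hp]
    · simp only [List.foldl_cons, if_neg hp]
      rw [ih acc (List.nodup_cons.mp hnd).2 (fun y hy => hacc y (by simp [hy]))]
      simp [hp]

-- the per-item membership count of A equals the multiplicity in the concatenation of the five sets
lemma count_eq (set1 set2 set3 set4 set5 : List String)
    (h1 : set1.Nodup) (h2 : set2.Nodup) (h3 : set3.Nodup) (h4 : set4.Nodup) (h5 : set5.Nodup)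
    (item : String) :
    pvCountA set1 set2 set3 set4 set5 item
      = (((((set1 ++ set2) ++ set3) ++ set4) ++ set5).count item : Int) := by
  have key : ∀ (s : List String), s.Nodup →
      (if PySem.Set.contains s item then (1 : Int) else 0) = (s.count item : Int) := by
    intro s hs
    by_cases hm : item ∈ s
    · rw [List.count_eq_one_of_mem hs hm]
      simp [PySem.Set.contains, hm]
    · rw [List.count_eq_zero.mpr hm]
      simp [PySem.Set.contains, hm]
  simp only [pvCountA, List.count_append, key set1 h1, key set2 h2, key set3 h3, key set4 h4,
    key set5 h5]
  push_cast
  ring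

theorem getCommon_spec : Claim_equal_getCommon := by
  intro set1 set2 set3 set4 set5 _ hpre
  obtain ⟨h1, h2, h3, h4, h5⟩ := hpre
  unfold Spec_getCommon getCommon getCommon_alt
  dsimp only
  -- B's side: the nested dict-building loop is Counter of the concatenation L;
  -- its items are the pairs (k, L.count k) over set(L)
  simp only [List.foldl_cons, List.foldl_nil]
  rw [← List.foldl_append, ← List.foldl_append, ← List.foldl_append, ← List.foldl_append,
    PySem.Dict.foldl_insert_getD_add_one_eq_counter, PySem.Dict.items_counter,
    List.filter_map, List.map_map]
  simp only [Function.comp_def, List.map_id']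
  -- A's side: the five-way union is set(L)
  rw [← PySem.Set.ofList_append]
  simp only [← List.append_assoc]
  rw [foldl_addIf (fun item => pvCountA set1 set2 set3 set4 set5 item > MAX_COMMON)
      _ PySem.Set.empty (PySem.Set.nodup_ofList _) (by simp [PySem.Set.empty])]
  simp only [PySem.Set.empty, List.nil_append]
  have hf : ∀ (x : String), x ∈ PySem.Set.ofList (set1 ++ set2 ++ set3 ++ set4 ++ set5) →
      (decide (pvCountA set1 set2 set3 set4 set5 x > MAX_COMMON))
        = (decide (((set1 ++ set2 ++ set3 ++ set4 ++ set5).count x : Int) > 2)) := by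
    intro x _
    rw [count_eq set1 set2 set3 set4 set5 h1 h2 h3 h4 h5 x]
    unfold MAX_COMMON
    rfl
  exact (List.filter_congr hf).trans
    (PySem.Set.ofList_eq_self_of_nodup _ (List.Nodup.filter _ (PySem.Set.nodup_ofList _))).symm
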